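-- pv_equiv track=rewrite | github.com/rolorjj/acc-cosc-1336-spring-2022-rolorjj | src/homework/e_functions/value_return.py | get_seconds
-- ===== SOURCE A (Python) =====
-- def get_seconds(epoch_seconds):
--     if ((epoch_seconds % 3600) == 0):
--         return 0
--     else:
--         seconds = epoch_seconds % 3600
--         if (seconds >= 60):
--             while seconds >= 60:
--                 seconds -= 60
--         return seconds
-- ===== SOURCE B (Python) =====
-- def get_seconds(epoch_seconds):
--     return epoch_seconds % 60
-- ===== Notes on version B (the rewrite author's own statement) =====
-- stated objective: simpler
-- what changed: Replaced the repeated-subtraction loop over the hour remainder (plus its special-cased early return) by the single closed-form modulo expression epoch_seconds % 60.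
import Mathlib
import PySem

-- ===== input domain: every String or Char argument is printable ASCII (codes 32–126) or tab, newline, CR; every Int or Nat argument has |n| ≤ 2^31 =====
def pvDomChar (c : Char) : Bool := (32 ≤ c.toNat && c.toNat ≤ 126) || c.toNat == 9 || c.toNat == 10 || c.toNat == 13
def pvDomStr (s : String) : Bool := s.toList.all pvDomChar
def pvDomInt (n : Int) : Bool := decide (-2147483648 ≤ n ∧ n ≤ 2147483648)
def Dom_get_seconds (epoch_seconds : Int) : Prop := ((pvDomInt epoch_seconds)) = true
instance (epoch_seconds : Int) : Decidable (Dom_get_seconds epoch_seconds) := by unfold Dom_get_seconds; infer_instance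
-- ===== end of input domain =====

-- B replaces A's repeated-subtraction loop by the closed form epoch_seconds % 60 (simpler).

-- ===== PORT A =====
-- the 'while seconds >= 60: seconds -= 60' loop, verbatim as structural recursion
def get_seconds_loop (seconds : Int) : Int :=
  if 60 ≤ seconds then get_seconds_loop (seconds - 60) else seconds
termination_by seconds.toNat
decreasing_by omega

def get_seconds (epoch_seconds : Int) : Int :=
  if PySem.Int.mod epoch_seconds 3600 = 0 then 0
  else
    let seconds := PySem.Int.mod epoch_seconds 3600
    if 60 ≤ seconds then get_seconds_loop seconds else seconds

-- ===== PORT B =====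
def get_seconds_alt (epoch_seconds : Int) : Int := PySem.Int.mod epoch_seconds 60

-- ===== PRECONDITION & SPEC =====
def Spec_get_seconds (epoch_seconds : Int) (out : Int) : Prop := out = get_seconds_alt epoch_seconds
instance (epoch_seconds : Int) (out : Int) : Decidable (Spec_get_seconds epoch_seconds out) := by unfold Spec_get_seconds; infer_instance

-- ===== CLAIM (what is proved, stated in full; the proofs are below) =====
def Claim_equal_get_seconds : Prop := ∀ (epoch_seconds : Int), Dom_get_seconds epoch_seconds → Spec_get_seconds epoch_seconds (get_seconds epoch_seconds)

-- ===== LEMMAS AND PROOFS =====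

-- the subtraction loop computes s % 60 for nonnegative s
theorem get_seconds_loop_eq (s : Int) (hs : 0 ≤ s) : get_seconds_loop s = s % 60 := by
  rw [get_seconds_loop]
  split_ifs with h
  · rw [get_seconds_loop_eq (s - 60) (by omega)]
    omega
  · omega
termination_by s.toNat
decreasing_by omega

-- ===== VERDICT (by name: the statement is the Claim_ definition above) =====
theorem get_seconds_spec : Claim_equal_get_seconds := by
  intro n _
  unfold Spec_get_seconds get_seconds get_seconds_alt
  rw [PySem.Int.mod_eq_emod_of_pos (a := n) (by norm_num : (0:Int) < 3600),
      PySem.Int.mod_eq_emod_of_pos (a := n) (by norm_num : (0:Int) < 60)]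
  have h60 : n % 3600 % 60 = n % 60 := Int.emod_emod_of_dvd n (by norm_num)
  have h0 : 0 ≤ n % 3600 := Int.emod_nonneg n (by norm_num)
  have hlt : n % 3600 < 3600 := Int.emod_lt_of_pos n (by norm_num)
  split_ifs with h1
  · omega
  · show (if 60 ≤ n % 3600 then get_seconds_loop (n % 3600) else n % 3600) = n % 60
    split_ifs with h2
    · rw [get_seconds_loop_eq _ h0, h60]
    · omega
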